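-- pv_equiv track=rewrite | github.com/kuznetsovvj/education | algorithms/codeforces/1851b.py | check
-- ===== SOURCE A (Python) =====
-- def check(seq):
--     t1 = [i for i in seq if i % 2 == 1]
--     t2 = [i for i in seq if i % 2 == 0]
--     t1.sort()
--     t2.sort()
--     i1, i2 = 0, 0
--     res = []
--     for i in range(len(seq)):
--         if seq[i] % 2 == 0:
--             res.append(t2[i2])
--             i2 += 1
--         else:
--             res.append(t1[i1])
--             i1 += 1
--     for i in range(1, len(seq)):
--         if res[i] < res[i-1]:
--             return "NO"
--     return "YES"
-- ===== SOURCE B (Python) =====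
-- def check(seq):
--     s = sorted(seq)
--     return "YES" if all(a % 2 == b % 2 for a, b in zip(seq, s)) else "NO"
-- ===== Notes on version B (the rewrite author's own statement) =====
-- stated objective: simpler
-- what changed: Replaces A's split-into-parity-lists, two sorts, index-driven reinterleave and adjacency scan with one full sort plus a position-wise parity comparison of seq against sorted(seq); a timing run measured this constant-factor win (the per-element work moves from a Python-level loop into built-ins).
import Mathlib
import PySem

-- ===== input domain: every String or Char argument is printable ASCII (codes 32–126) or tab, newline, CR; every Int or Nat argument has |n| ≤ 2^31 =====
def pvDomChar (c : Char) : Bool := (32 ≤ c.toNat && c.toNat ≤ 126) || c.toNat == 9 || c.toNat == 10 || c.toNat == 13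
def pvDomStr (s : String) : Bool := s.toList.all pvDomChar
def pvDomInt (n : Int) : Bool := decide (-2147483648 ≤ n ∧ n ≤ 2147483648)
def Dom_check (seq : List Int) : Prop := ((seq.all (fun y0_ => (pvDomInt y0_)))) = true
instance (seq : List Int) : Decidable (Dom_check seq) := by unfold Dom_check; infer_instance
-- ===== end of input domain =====

-- B replaces A's parity-split + two sorts + index-driven reinterleave + adjacency scan by one
-- full sort and a position-wise parity comparison (simpler; same return value everywhere).

-- ===== PORT A =====
-- the first for-loop: state (i1, i2, res), indexing t1/t2 with pyGet?.
-- The index is always in range for the arguments A passes (t1/t2 hold exactly the odd/even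
-- elements of seq), so Python never raises here; `.getD 0` is the never-exercised default.
def checkBuild (t1 t2 : List Int) : List Int → Nat → Nat → List Int → List Int
  | [], _, _, res => res
  | x :: xs, i1, i2, res =>
    if PySem.Int.mod x 2 == 0 then
      checkBuild t1 t2 xs i1 (i2 + 1) (res ++ [(PySem.List.pyGet? t2 (i2 : Int)).getD 0])
    else
      checkBuild t1 t2 xs (i1 + 1) i2 (res ++ [(PySem.List.pyGet? t1 (i1 : Int)).getD 0])

-- the second for-loop: compare res[i] with res[i-1], early return "NO"
def checkScan : List Int → String
  | a :: b :: rest => if b < a then "NO" else checkScan (b :: rest)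
  | _ => "YES"

def check (seq : List Int) : String :=
  let t1 := PySem.List.sorted (seq.filter (fun i => PySem.Int.mod i 2 == 1)) (fun x => x) false
  let t2 := PySem.List.sorted (seq.filter (fun i => PySem.Int.mod i 2 == 0)) (fun x => x) false
  checkScan (checkBuild t1 t2 seq 0 0 [])

-- ===== PORT B =====
def check_alt (seq : List Int) : String :=
  let s := PySem.List.sorted seq (fun x => x) false
  if (seq.zip s).all (fun p => PySem.Int.mod p.1 2 == PySem.Int.mod p.2 2) then "YES" else "NO"

-- ===== PRECONDITION & SPEC =====
def Spec_check (seq : List Int) (out : String) : Prop := out = check_alt seq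
instance (seq : List Int) (out : String) : Decidable (Spec_check seq out) := by unfold Spec_check; infer_instance

-- ===== CLAIM (what is proved, stated in full; the proofs are below) =====
def Claim_equal_check : Prop := ∀ (seq : List Int), Dom_check seq → Spec_check seq (check seq)

-- ===== LEMMAS AND PROOFS =====

-- proof-only model of the reinterleave: consume t1/t2 from the front along seq's parity pattern
def itl : List Int → List Int → List Int → List Int
  | [], _, _ => []
  | x :: xs, t1, t2 =>
    if PySem.Int.mod x 2 == 0 then t2.headD 0 :: itl xs t1 t2.tail
    else t1.headD 0 :: itl xs t1.tail t2

lemma build_eq (t1 t2 : List Int) : ∀ (xs : List Int) (i1 i2 : Nat) (res : List Int),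
    checkBuild t1 t2 xs i1 i2 res = res ++ itl xs (t1.drop i1) (t2.drop i2)
  | [], _, _, _ => by simp [checkBuild, itl]
  | x :: xs, i1, i2, res => by
    rw [checkBuild, itl]
    by_cases h : PySem.Int.mod x 2 = 0
    · simp only [h, BEq.rfl, if_pos, build_eq t1 t2 xs i1 (i2 + 1)]
      rw [List.headD_eq_head?, List.head?_drop, ← List.tail_drop, PySem.List.pyGet?_natCast]
      simp
    · have hb : (PySem.Int.mod x 2 == 0) = false := by simpa using h
      simp only [hb, if_neg, Bool.false_eq_true, not_false_iff, build_eq t1 t2 xs (i1 + 1) i2]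
      rw [List.headD_eq_head?, List.head?_drop, ← List.tail_drop, PySem.List.pyGet?_natCast]
      simp

-- Bool forms of the parity tests, from PySem.Int.mod_two_eq
lemma fe_T {x : Int} (h : PySem.Int.mod x 2 = 0) : (PySem.Int.mod x 2 == 0) = true := by rw [h]; rfl
lemma fo_F {x : Int} (h : PySem.Int.mod x 2 = 0) : (PySem.Int.mod x 2 == 1) = false := by rw [h]; rfl
lemma fe_F {x : Int} (h : PySem.Int.mod x 2 = 1) : (PySem.Int.mod x 2 == 0) = false := by rw [h]; rfl
lemma fo_T {x : Int} (h : PySem.Int.mod x 2 = 1) : (PySem.Int.mod x 2 == 1) = true := by rw [h]; rfl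

lemma checkScan_eq : ∀ l : List Int,
    checkScan l = if List.Pairwise (· ≤ ·) l then "YES" else "NO"
  | [] => by simp [checkScan]
  | [a] => by simp [checkScan]
  | a :: b :: t => by
    rw [checkScan, checkScan_eq (b :: t)]
    by_cases h : b < a
    · have hnp : ¬ List.Pairwise (· ≤ ·) (a :: b :: t) := by
        rw [List.pairwise_cons]
        rintro ⟨hf, -⟩
        exact absurd (hf b (by simp)) (by omega)
      rw [if_pos h, if_neg hnp]
    · rw [if_neg h]
      have hab : a ≤ b := not_lt.mp h
      by_cases hp : List.Pairwise (· ≤ ·) (b :: t)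
      · have hp2 : List.Pairwise (· ≤ ·) (a :: b :: t) := by
          refine List.Pairwise.cons ?_ hp
          rw [List.pairwise_cons] at hp
          intro y hy
          rcases List.mem_cons.mp hy with rfl | hy
          · exact hab
          · exact le_trans hab (hp.1 y hy)
        rw [if_pos hp, if_pos hp2]
      · have hnp : ¬ List.Pairwise (· ≤ ·) (a :: b :: t) := by
          intro h2
          rw [List.pairwise_cons] at h2
          exact hp h2.2
        rw [if_neg hp, if_neg hnp]

lemma itl_parity_perm : ∀ (sq t1 t2 : List Int),
    t1.length = (sq.filter (fun i => PySem.Int.mod i 2 == 1)).length →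
    t2.length = (sq.filter (fun i => PySem.Int.mod i 2 == 0)).length →
    (∀ x ∈ t1, PySem.Int.mod x 2 = 1) → (∀ x ∈ t2, PySem.Int.mod x 2 = 0) →
    (itl sq t1 t2).map (fun x => PySem.Int.mod x 2) = sq.map (fun x => PySem.Int.mod x 2) ∧
      (itl sq t1 t2).Perm (t1 ++ t2)
  | [], t1, t2, h1, h2, _, _ => by
    simp only [List.filter_nil, List.length_nil] at h1 h2
    rw [List.length_eq_zero_iff] at h1 h2
    subst h1; subst h2
    simp [itl]
  | x :: xs, t1, t2, h1, h2, ho, he => by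
    rcases PySem.Int.mod_two_eq x with hx | hx
    · simp only [List.filter_cons, fe_T hx, fo_F hx, Bool.false_eq_true, if_false, if_true,
        List.length_cons] at h1 h2
      rcases t2 with _ | ⟨y, t2'⟩
      · simp at h2
      · have ih := itl_parity_perm xs t1 t2' h1 (by simpa using h2) ho
          (fun z hz => he z (by simp [hz]))
        have hy : PySem.Int.mod y 2 = 0 := he y (by simp)
        rw [itl]
        simp only [fe_T hx, if_true, List.headD_cons, List.tail_cons]
        constructor
        · simp only [List.map_cons]
          rw [ih.1, hy, hx]
        · exact ((ih.2.cons y).trans List.perm_middle.symm)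
    · simp only [List.filter_cons, fe_F hx, fo_T hx, Bool.false_eq_true, if_false, if_true,
        List.length_cons] at h1 h2
      rcases t1 with _ | ⟨y, t1'⟩
      · simp at h1
      · have ih := itl_parity_perm xs t1' t2 (by simpa using h1) h2
          (fun z hz => ho z (by simp [hz])) he
        have hy : PySem.Int.mod y 2 = 1 := ho y (by simp)
        rw [itl]
        simp only [fe_F hx, Bool.false_eq_true, if_false, List.headD_cons, List.tail_cons]
        constructor
        · simp only [List.map_cons]
          rw [ih.1, hy, hx]
        · exact ih.2.cons y

lemma itl_reconstruct : ∀ (sq u : List Int),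
    sq.map (fun x => PySem.Int.mod x 2) = u.map (fun x => PySem.Int.mod x 2) →
    itl sq (u.filter (fun i => PySem.Int.mod i 2 == 1)) (u.filter (fun i => PySem.Int.mod i 2 == 0)) = u
  | [], u, h => by
    have hu : u = [] := by
      cases u
      · rfl
      · simp at h
    subst hu; simp [itl]
  | x :: xs, u, h => by
    rcases u with _ | ⟨y, ys⟩
    · simp at h
    · simp only [List.map_cons, List.cons.injEq] at h
      rcases PySem.Int.mod_two_eq x with hx | hx
      · have hy : PySem.Int.mod y 2 = 0 := by rw [← h.1, hx]
        simp only [List.filter_cons, fe_T hy, fo_F hy, Bool.false_eq_true, if_false, if_true]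
        rw [itl]
        simp only [fe_T hx, if_true, List.headD_cons, List.tail_cons]
        rw [itl_reconstruct xs ys h.2]
      · have hy : PySem.Int.mod y 2 = 1 := by rw [← h.1, hx]
        simp only [List.filter_cons, fe_F hy, fo_T hy, Bool.false_eq_true, if_false, if_true]
        rw [itl]
        simp only [fe_F hx, Bool.false_eq_true, if_false, List.headD_cons, List.tail_cons]
        rw [itl_reconstruct xs ys h.2]

lemma zipAll_iff : ∀ (l1 l2 : List Int), l1.length = l2.length →
    (((l1.zip l2).all (fun p => PySem.Int.mod p.1 2 == PySem.Int.mod p.2 2)) = true ↔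
      l1.map (fun x => PySem.Int.mod x 2) = l2.map (fun x => PySem.Int.mod x 2))
  | [], [], _ => by simp
  | [], _ :: _, h => by simp at h
  | _ :: _, [], h => by simp at h
  | a :: l1, b :: l2, h => by
    simp only [List.zip_cons_cons, List.all_cons, List.map_cons, Bool.and_eq_true, beq_iff_eq,
      List.cons.injEq]
    rw [zipAll_iff l1 l2 (by simpa using h)]

-- the odd and even sublists together are a rearrangement of seq
lemma perm_split (sq : List Int) :
    ((sq.filter (fun i => PySem.Int.mod i 2 == 1)) ++ (sq.filter (fun i => PySem.Int.mod i 2 == 0))).Perm sq := by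
  have hcongr : sq.filter (fun i => PySem.Int.mod i 2 == 0)
      = sq.filter (fun i => !(PySem.Int.mod i 2 == 1)) := by
    apply List.filter_congr
    intro x _
    rcases PySem.Int.mod_two_eq x with hx | hx
    · simp only [fe_T hx, fo_F hx]; rfl
    · simp only [fe_F hx, fo_T hx]; rfl
  rw [hcongr]
  exact List.filter_append_perm _ sq

theorem check_eq_alt (seq : List Int) : check seq = check_alt seq := by
  unfold check check_alt
  simp only []
  set T1 := PySem.List.sorted (seq.filter (fun i => PySem.Int.mod i 2 == 1)) (fun x => x) false with hT1
  set T2 := PySem.List.sorted (seq.filter (fun i => PySem.Int.mod i 2 == 0)) (fun x => x) false with hT2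
  set s := PySem.List.sorted seq (fun x => x) false with hs
  have hsperm : s.Perm seq := PySem.List.sorted_perm _ _ _
  have hspair : List.Pairwise (· ≤ ·) s := PySem.List.sorted_pairwise seq (fun x => x)
  have hr : checkBuild T1 T2 seq 0 0 [] = itl seq T1 T2 := by
    rw [build_eq]; simp
  rw [hr, checkScan_eq]
  have hpp := itl_parity_perm seq T1 T2
    (by rw [hT1, PySem.List.length_sorted])
    (by rw [hT2, PySem.List.length_sorted])
    (by intro x hx
        have := (PySem.List.mem_sorted _ _ _ x).mp (hT1 ▸ hx)
        simpa using List.of_mem_filter this)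
    (by intro x hx
        have := (PySem.List.mem_sorted _ _ _ x).mp (hT2 ▸ hx)
        simpa using List.of_mem_filter this)
  have hrperm : (itl seq T1 T2).Perm seq := by
    refine hpp.2.trans ?_
    refine ((PySem.List.sorted_perm _ _ _).append (PySem.List.sorted_perm _ _ _)).trans ?_
    exact perm_split seq
  have hlen : seq.length = s.length := (PySem.List.length_sorted _ _ _).symm
  by_cases hpar : seq.map (fun x => PySem.Int.mod x 2) = s.map (fun x => PySem.Int.mod x 2)
  · -- parities match positionwise: A's reinterleave IS sorted(seq)
    have hT1s : T1 = s.filter (fun i => PySem.Int.mod i 2 == 1) := by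
      rw [hT1]
      exact PySem.List.sorted_id_eq_of_perm_of_pairwise _ _
        (hsperm.filter _) (List.Pairwise.sublist List.filter_sublist hspair)
    have hT2s : T2 = s.filter (fun i => PySem.Int.mod i 2 == 0) := by
      rw [hT2]
      exact PySem.List.sorted_id_eq_of_perm_of_pairwise _ _
        (hsperm.filter _) (List.Pairwise.sublist List.filter_sublist hspair)
    have hrs : itl seq T1 T2 = s := by
      rw [hT1s, hT2s]
      exact itl_reconstruct seq s hpar
    rw [hrs, if_pos hspair, if_pos ((zipAll_iff seq s hlen).mpr hpar)]
  · -- parities differ somewhere: the reinterleave cannot be sorted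
    have hnot : ¬ List.Pairwise (· ≤ ·) (itl seq T1 T2) := by
      intro hsorted
      apply hpar
      have : s = itl seq T1 T2 :=
        PySem.List.sorted_id_eq_of_perm_of_pairwise seq _ hrperm hsorted
      rw [this]
      exact hpp.1.symm
    rw [if_neg hnot,
      if_neg (fun hall => hpar ((zipAll_iff seq s hlen).mp hall))]

-- ===== VERDICT (by name: the statement is the Claim_ definition above) =====
theorem check_spec : Claim_equal_check := by
  intro seq _
  unfold Spec_check
  exact check_eq_alt seq
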